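-- pv_equiv track=rewrite | github.com/DaudiKi/Snake_Game_py | snake_pygame.py | get_snake_color
-- ===== SOURCE A (Python) =====
-- from typing import List, Tuple, Set, Optional, Dict, Any  # Type hints for better code documentation
--
-- FEATURES = {
--     "score_tier_colors": True,      # Snake changes color based on score level
--     "moving_food": True,            # Food can move around the board
--     "special_food": True,           # Enable golden and rotten food types
--     "progressive_obstacles": True,  # Obstacles appear as game progresses
--     "bounded_grid": True,           # Snake dies when hitting walls (no wrapping)
--     "speed_scales_with_eats": True, # Game speed increases with each food eaten
--     "sound_effects": True,          # Play sound effects for actions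
--     "leaderboard": True,            # Save and display high scores
-- }
--
-- GAME_TUNING = {
--     # Grid and display settings
--     "grid_cell": 20,                # Size of each grid cell in pixels
--     "leaderboard_size": 5,          # Number of top scores to store
--
--     # Food behavior settings
--     "food_move_every_n_ticks": 6,   # How often moving food changes position
--     "special_spawn_chance": 0.22,   # Probability of spawning special food (golden/rotten)
--     "rotten_ratio_within_special": 0.35,  # Chance rotten food appears when special food spawns
--
--     # Snake settings
--     "min_snake_len": 1,             # Minimum snake length (prevents complete elimination)
--
--     # Obstacle settings
--     "obstacle_every_n_foods": 3,    # Spawn obstacle every N foods eaten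
--     "max_obstacles": 40,            # Maximum number of obstacles on screen
--
--     # Speed progression settings
--     "speed_base": 4,                # Starting game speed (frames per second)
--     "speed_step_per_food": 0.3,     # Speed increase per food eaten
--     "speed_max": 15,                # Maximum game speed cap
--
--     # Visual progression settings
--     "score_tiers": [0, 5, 10, 20, 35, 50],  # Score thresholds for color changes
--     "tier_colors": ["#22c55e", "#3b82f6", "#a855f7", "#f59e0b", "#ef4444", "#eab308"],  # Colors for each tier
-- }
--
-- GREEN = (34, 197, 94)                # #22c55e - Normal food and default snake
--
-- def get_snake_color(score: int) -> Tuple[int, int, int]: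
--     """
--     Get the snake color based on the current score tier.
--     Snake changes color as the player progresses through score levels.
--
--     Args:
--         score: Current player score
--
--     Returns:
--         RGB color tuple for the snake
--     """
--     if not FEATURES["score_tier_colors"]:
--         return GREEN  # Default color if tier colors disabled
--
--     tiers = GAME_TUNING["score_tiers"]      # Score thresholds
--     colors = GAME_TUNING["tier_colors"]     # Corresponding colors
--
--     # Find the highest tier the score qualifies for
--     for i in range(len(tiers) - 1, -1, -1):
--         if score >= tiers[i]:
--             color_hex = colors[i]
--             # Convert hex color to RGB tuple
--             return tuple(int(color_hex[j:j+2], 16) for j in (1, 3, 5))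
--
--     return GREEN  # Default color if no tier matched
-- ===== SOURCE B (Python) =====
-- import bisect
-- from typing import Tuple
--
-- FEATURES = {"score_tier_colors": True}
-- GAME_TUNING = {
--     "score_tiers": [0, 5, 10, 20, 35, 50],
--     "tier_colors": ["#22c55e", "#3b82f6", "#a855f7", "#f59e0b", "#ef4444", "#eab308"],
-- }
-- GREEN = (34, 197, 94)
--
-- def get_snake_color(score: int) -> Tuple[int, int, int]:
--     if not FEATURES["score_tier_colors"]:
--         return GREEN
--     tiers = GAME_TUNING["score_tiers"]
--     colors = GAME_TUNING["tier_colors"]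
--     # binary search for the highest tier <= score; clamp negatives to tier 0 (= GREEN)
--     idx = max(bisect.bisect_right(tiers, score) - 1, 0)
--     color_hex = colors[idx]
--     return tuple(int(color_hex[j:j+2], 16) for j in (1, 3, 5))
-- ===== Notes on version B (the rewrite author's own statement) =====
-- stated objective: idiomatic
-- what changed: Replaced the descending linear scan over the score tiers by bisect.bisect_right on the sorted thresholds, clamped at the lowest tier so negative scores get the first color, GREEN, exactly like A's fallback.
import Mathlib
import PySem

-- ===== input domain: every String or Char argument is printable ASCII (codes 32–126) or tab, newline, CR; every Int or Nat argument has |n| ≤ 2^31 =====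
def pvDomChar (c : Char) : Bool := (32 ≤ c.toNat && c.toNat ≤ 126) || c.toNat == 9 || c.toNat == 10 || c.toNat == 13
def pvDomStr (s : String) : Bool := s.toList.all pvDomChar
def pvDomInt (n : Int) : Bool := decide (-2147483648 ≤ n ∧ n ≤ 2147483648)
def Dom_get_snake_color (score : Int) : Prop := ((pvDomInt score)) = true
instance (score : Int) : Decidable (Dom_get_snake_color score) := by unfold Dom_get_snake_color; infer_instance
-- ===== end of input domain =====

-- B replaces A's descending linear scan over the tiers by a bisect_right binary search with a clamp (idiomatic).

-- shared module constants (GAME_TUNING["score_tiers"] / ["tier_colors"], FEATURES["score_tier_colors"], GREEN)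
def pvScoreTierColors : Bool := true
def pvTiers : List Int := [0, 5, 10, 20, 35, 50]
def pvColors : List String := ["#22c55e", "#3b82f6", "#a855f7", "#f59e0b", "#ef4444", "#eab308"]
def pvGreen : Int × Int × Int := (34, 197, 94)

-- tuple(int(color_hex[j:j+2], 16) for j in (1, 3, 5)); int(·,16) never raises on the literal
-- colors above, so the .getD 0 total form is exact here
def pvHexAt (s : String) (j : Int) : Int :=
  (PySem.Int.ofStrBase? (PySem.Str.slice s (some j) (some (j + 2))) 16).getD 0
def pvHexRGB (s : String) : Int × Int × Int := (pvHexAt s 1, pvHexAt s 3, pvHexAt s 5)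

-- ===== PORT A =====
-- for i in range(len(tiers)-1, -1, -1): if score >= tiers[i]: return rgb(colors[i])  (early return)
def pvLoopA (score : Int) : List Int → Int × Int × Int
  | [] => pvGreen
  | i :: rest =>
      if score ≥ PySem.List.pyGetD pvTiers i 0 then
        pvHexRGB (PySem.List.pyGetD pvColors i "")
      else pvLoopA score rest

def get_snake_color (score : Int) : Int × Int × Int :=
  if ¬ pvScoreTierColors then pvGreen
  else pvLoopA score (PySem.List.pyRange (PySem.List.len pvTiers - 1) (-1) (-1))

-- ===== PORT B =====
-- bisect.bisect_right(xs, x): while lo < hi: mid = (lo+hi)//2; if x < xs[mid]: hi = mid else lo = mid+1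
-- (fuel = hi - lo suffices; xs[mid] is always in range here, so the .getD 0 total form is exact)
def pvBisectRight (xs : List Int) (x : Int) : Nat → Nat → Nat → Nat
  | 0, lo, _ => lo
  | fuel + 1, lo, hi =>
      if lo < hi then
        let mid := (lo + hi) / 2
        if x < PySem.List.pyGetD xs (mid : Int) 0 then pvBisectRight xs x fuel lo mid
        else pvBisectRight xs x fuel (mid + 1) hi
      else lo

def get_snake_color_alt (score : Int) : Int × Int × Int :=
  if ¬ pvScoreTierColors then pvGreen
  else
    let idx : Int := max ((pvBisectRight pvTiers score pvTiers.length 0 pvTiers.length : Int) - 1) 0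
    pvHexRGB (PySem.List.pyGetD pvColors idx "")

-- ===== PRECONDITION & SPEC =====
def Spec_get_snake_color (score : Int) (out : Int × Int × Int) : Prop := out = get_snake_color_alt score
instance (score : Int) (out : Int × Int × Int) : Decidable (Spec_get_snake_color score out) := by unfold Spec_get_snake_color; infer_instance

-- ===== CLAIM (what is proved, stated in full; the proofs are below) =====
def Claim_equal_get_snake_color : Prop := ∀ (score : Int), Dom_get_snake_color score → Spec_get_snake_color score (get_snake_color score)

-- ===== LEMMAS AND PROOFS =====

-- ===== VERDICT (by name: the statement is the Claim_ definition above) =====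
theorem get_snake_color_spec : Claim_equal_get_snake_color := by
  intro score _
  unfold Spec_get_snake_color get_snake_color get_snake_color_alt
  have hr : PySem.List.pyRange (PySem.List.len pvTiers - 1) (-1) (-1) = [5, 4, 3, 2, 1, 0] := by decide
  rw [hr]
  have t0 : PySem.List.pyGetD pvTiers 0 0 = 0 := by decide
  have t1 : PySem.List.pyGetD pvTiers 1 0 = 5 := by decide
  have t2 : PySem.List.pyGetD pvTiers 2 0 = 10 := by decide
  have t3 : PySem.List.pyGetD pvTiers 3 0 = 20 := by decide
  have t4 : PySem.List.pyGetD pvTiers 4 0 = 35 := by decide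
  have t5 : PySem.List.pyGetD pvTiers 5 0 = 50 := by decide
  have hl : pvTiers.length = 6 := rfl
  by_cases h50 : 50 <= score
  · simp [pvLoopA, pvBisectRight, pvScoreTierColors, hl, t0, t1, t2, t3, t4, t5,
      show (score < 50) = False by simp; omega, show (score < 35) = False by simp; omega, show (score < 20) = False by simp; omega, h50]
  ·
    by_cases h35 : 35 <= score
    · simp [pvLoopA, pvBisectRight, pvScoreTierColors, hl, t0, t1, t2, t3, t4, t5,
        show (50 <= score) = False by simp; omega, show (score < 50) = True by simp; omega, show (score < 35) = False by simp; omega, show (score < 20) = False by simp; omega, h35]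
    ·
      by_cases h20 : 20 <= score
      · simp [pvLoopA, pvBisectRight, pvScoreTierColors, hl, t0, t1, t2, t3, t4, t5,
          show (50 <= score) = False by simp; omega, show (35 <= score) = False by simp; omega, show (score < 50) = True by simp; omega, show (score < 35) = True by simp; omega, show (score < 20) = False by simp; omega, h20]
      ·
        by_cases h10 : 10 <= score
        · simp [pvLoopA, pvBisectRight, pvScoreTierColors, hl, t0, t1, t2, t3, t4, t5,
            show (50 <= score) = False by simp; omega, show (35 <= score) = False by simp; omega, show (20 <= score) = False by simp; omega, show (score < 20) = True by simp; omega, show (score < 10) = False by simp; omega, show (score < 5) = False by simp; omega, h10]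
        ·
          by_cases h5 : 5 <= score
          · simp [pvLoopA, pvBisectRight, pvScoreTierColors, hl, t0, t1, t2, t3, t4, t5,
              show (50 <= score) = False by simp; omega, show (35 <= score) = False by simp; omega, show (20 <= score) = False by simp; omega, show (10 <= score) = False by simp; omega, show (score < 20) = True by simp; omega, show (score < 10) = True by simp; omega, show (score < 5) = False by simp; omega, h5]
          ·
            by_cases h0 : 0 <= score
            · simp [pvLoopA, pvBisectRight, pvScoreTierColors, hl, t0, t1, t2, t3, t4, t5,
                show (50 <= score) = False by simp; omega, show (35 <= score) = False by simp; omega, show (20 <= score) = False by simp; omega, show (10 <= score) = False by simp; omega, show (5 <= score) = False by simp; omega, show (score < 20) = True by simp; omega, show (score < 10) = True by simp; omega, show (score < 5) = True by simp; omega, show (score < 0) = False by simp; omega, h0]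
            ·
              simp [pvLoopA, pvBisectRight, pvScoreTierColors, hl, t0, t1, t2, t3, t4, t5, pvGreen, pvHexRGB, pvHexAt, pvColors,
                show (50 <= score) = False by simp; omega, show (35 <= score) = False by simp; omega, show (20 <= score) = False by simp; omega, show (10 <= score) = False by simp; omega, show (5 <= score) = False by simp; omega, show (0 <= score) = False by simp; omega, show (score < 20) = True by simp; omega, show (score < 10) = True by simp; omega, show (score < 5) = True by simp; omega, show (score < 0) = True by simp; omega]
              decide
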